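-- pv_equiv track=rewrite | github.com/andyljones/boardlaw | rebar/rebar/storing.py | expand_once
-- ===== SOURCE A (Python) =====
-- def expand_once(state_dicts):
--     d = {}
--     for k, v in state_dicts.items():
--         parts = k.split('.')
--         [head] = parts[:1]
--         tail = '.'.join(parts[1:])
--         d.setdefault(head, {})[tail] = v
--     return d
-- ===== SOURCE B (Python) =====
-- def expand_once(state_dicts):
--     pairs = [(k.partition('.'), v) for k, v in state_dicts.items()]
--     heads = list(dict.fromkeys(h for (h, _, _), _ in pairs))
--     return {h: {t: v for (h2, _, t), v in pairs if h2 == h} for h in heads}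
-- ===== Notes on version B (the rewrite author's own statement) =====
-- stated objective: alternative
-- what changed: A buckets incrementally with setdefault while iterating; B makes two grouped passes: it splits every key once with partition, collects the distinct heads in first-occurrence order via dict.fromkeys, then builds each inner dict with one dict comprehension per head.
import Mathlib
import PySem

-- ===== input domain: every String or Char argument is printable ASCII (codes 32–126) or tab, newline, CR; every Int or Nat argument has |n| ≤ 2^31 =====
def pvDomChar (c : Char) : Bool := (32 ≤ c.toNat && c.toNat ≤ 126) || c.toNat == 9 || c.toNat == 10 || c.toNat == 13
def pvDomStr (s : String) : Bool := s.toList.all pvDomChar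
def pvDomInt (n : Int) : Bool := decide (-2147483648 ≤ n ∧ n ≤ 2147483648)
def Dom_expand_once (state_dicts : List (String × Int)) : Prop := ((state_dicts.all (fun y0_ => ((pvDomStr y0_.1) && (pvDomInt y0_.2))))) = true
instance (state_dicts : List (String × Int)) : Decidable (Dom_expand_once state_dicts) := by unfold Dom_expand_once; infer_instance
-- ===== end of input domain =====

-- B groups the keys in two passes (first-occurrence list of heads, then one dict comprehension
-- per head) instead of A's incremental setdefault bucketing; objective: alternative.


-- ===== PORT A =====
-- d.setdefault(head, {})[tail] = v  is exactly  d[head] = d.get(head, {}) with tail ↦ v,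
-- i.e. PySem.Dict.modify head empty (·.insert tail v).
def expand_once (state_dicts : List (String × Int)) : List (String × List (String × Int)) :=
  let d : PySem.Dict String (PySem.Dict String Int) :=
    state_dicts.foldl (fun d kv =>
      let parts := PySem.Chars.splitOn kv.1.toList ['.']
      -- [head] = parts[:1]
      let head := String.ofList ((PySem.List.slice parts none (some 1)).headD [])
      -- tail = '.'.join(parts[1:])
      let tail := String.ofList (PySem.Chars.join ['.'] (PySem.List.slice parts (some 1) none))
      d.modify head PySem.Dict.empty (fun inner => inner.insert tail kv.2))
      PySem.Dict.empty
  d.items.map (fun p => (p.1, p.2.items))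

-- ===== PORT B =====
-- k.partition('.') for a single-character separator: head = chars before the first '.',
-- tail = chars after it ('' when there is no '.'); exact port of str.partition on this input.
def pvPartitionHT (k : String) : String × String :=
  let cs := k.toList
  (String.ofList (cs.takeWhile (fun c => !(c == '.'))),
   String.ofList ((cs.dropWhile (fun c => !(c == '.'))).drop 1))

def expand_once_alt (state_dicts : List (String × Int)) : List (String × List (String × Int)) :=
  let pairs := state_dicts.map (fun kv => (pvPartitionHT kv.1, kv.2))
  let heads := PySem.List.dedup (pairs.map (fun p => p.1.1))
  heads.map (fun h =>
    (h, ((pairs.filter (fun p => p.1.1 == h)).foldl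
           (fun (inner : PySem.Dict String Int) p => inner.insert p.1.2 p.2)
           PySem.Dict.empty).items))

-- ===== PRECONDITION & SPEC =====
def Spec_expand_once (state_dicts : List (String × Int)) (out : List (String × List (String × Int))) : Prop := out = expand_once_alt state_dicts
instance (state_dicts : List (String × Int)) (out : List (String × List (String × Int))) : Decidable (Spec_expand_once state_dicts out) := by unfold Spec_expand_once; infer_instance

-- ===== CLAIM (what is proved, stated in full; the proofs are below) =====
def Claim_equal_expand_once : Prop := ∀ (state_dicts : List (String × Int)), Dom_expand_once state_dicts → Spec_expand_once state_dicts (expand_once state_dicts)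

-- ===== LEMMAS AND PROOFS =====

def pvDsplit : List Char → List (List Char)
  | [] => [[]]
  | c :: rest =>
    if c == '.' then [] :: pvDsplit rest
    else
      match pvDsplit rest with
      | [] => [[c]]
      | p :: ps => (c :: p) :: ps

def pvConsHead (a : List Char) : List (List Char) → List (List Char)
  | [] => [a]
  | p :: ps => (a ++ p) :: ps

lemma pvDsplit_ne_nil (cs : List Char) : pvDsplit cs ≠ [] := by
  cases cs with
  | nil => simp [pvDsplit]
  | cons c rest =>
    simp only [pvDsplit]
    split
    · simp
    · cases pvDsplit rest <;> simp

lemma pvConsHead_consHead (a b : List Char) (l : List (List Char)) (h : l ≠ []) :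
    pvConsHead a (pvConsHead b l) = pvConsHead (a ++ b) l := by
  cases l with
  | nil => simp at h
  | cons p ps => simp [pvConsHead]

lemma pvGo_eq : ∀ (fuel : Nat) (l cur : List Char) (acc : List (List Char)),
    l.length ≤ fuel →
    PySem.Chars.splitOn.go ['.'] fuel l cur acc = acc.reverse ++ pvConsHead cur.reverse (pvDsplit l)
  | 0, l, cur, acc, h => by
    have : l = [] := by cases l <;> simp_all
    subst this
    simp [PySem.Chars.splitOn.go, pvDsplit, pvConsHead]
  | (fuel+1), [], cur, acc, h => by
    simp [PySem.Chars.splitOn.go, pvDsplit, pvConsHead]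
  | (fuel+1), c :: rest, cur, acc, h => by
    rw [PySem.Chars.splitOn.go]
    by_cases hc : c = '.'
    · subst hc
      have hpre : List.isPrefixOf ['.'] ('.' :: rest) = true := by simp [List.isPrefixOf]
      rw [if_pos hpre]
      rw [pvGo_eq fuel _ _ _ (by simpa using Nat.le_of_succ_le_succ h)]
      simp [pvDsplit, pvConsHead]
      cases hd : pvDsplit rest with
      | nil => exact absurd hd (pvDsplit_ne_nil rest)
      | cons p ps => simp
    · have hpre : List.isPrefixOf ['.'] (c :: rest) = false := by
        simp [List.isPrefixOf]
        exact fun h' => hc h'.symm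
      rw [if_neg (by simp [hpre])]
      rw [pvGo_eq fuel _ _ _ (by simpa using Nat.le_of_succ_le_succ h)]
      have hcne : (c == '.') = false := by simp [hc]
      have hrhs : pvDsplit (c :: rest) = pvConsHead [c] (pvDsplit rest) := by
        simp only [pvDsplit, hcne]
        cases hd : pvDsplit rest with
        | nil => exact absurd hd (pvDsplit_ne_nil rest)
        | cons p ps => simp [pvConsHead]
      rw [hrhs, pvConsHead_consHead _ _ _ (pvDsplit_ne_nil rest)]
      simp

lemma splitOn_eq_dsplit (cs : List Char) : PySem.Chars.splitOn cs ['.'] = pvDsplit cs := by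
  rw [PySem.Chars.splitOn, pvGo_eq (cs.length + 1) cs [] [] (by omega)]
  cases hd : pvDsplit cs with
  | nil => exact absurd hd (pvDsplit_ne_nil cs)
  | cons p ps => simp [pvConsHead]

lemma join_consHead (a p : List Char) (ps : List (List Char)) :
    PySem.Chars.join ['.'] ((a ++ p) :: ps) = a ++ PySem.Chars.join ['.'] (p :: ps) := by
  cases ps with
  | nil => simp [PySem.Chars.join_singleton]
  | cons q qs => simp [PySem.Chars.join_cons_cons]

lemma join_dsplit (cs : List Char) : PySem.Chars.join ['.'] (pvDsplit cs) = cs := by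
  induction cs with
  | nil => simp [pvDsplit, PySem.Chars.join_singleton]
  | cons c rest ih =>
    by_cases hc : c = '.'
    · subst hc
      have h1 : pvDsplit ('.' :: rest) = [] :: pvDsplit rest := by simp [pvDsplit]
      rw [h1]
      cases hd : pvDsplit rest with
      | nil => exact absurd hd (pvDsplit_ne_nil rest)
      | cons p ps =>
        rw [hd] at ih
        rw [PySem.Chars.join_cons_cons, ih]
        simp
    · have hcne : (c == '.') = false := by simp [hc]
      cases hd : pvDsplit rest with
      | nil => exact absurd hd (pvDsplit_ne_nil rest)
      | cons p ps =>
        have h1 : pvDsplit (c :: rest) = (c :: p) :: ps := by simp [pvDsplit, hcne, hd]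
        rw [hd] at ih
        rw [h1, show (c :: p) = [c] ++ p by rfl, join_consHead, ih]
        simp

lemma dsplit_head (cs : List Char) :
    (pvDsplit cs).headD [] = cs.takeWhile (fun c => !(c == '.')) := by
  induction cs with
  | nil => simp [pvDsplit]
  | cons c rest ih =>
    by_cases hc : c = '.'
    · subst hc; simp [pvDsplit, List.takeWhile]
    · have hcne : (c == '.') = false := by simp [hc]
      cases hd : pvDsplit rest with
      | nil => exact absurd hd (pvDsplit_ne_nil rest)
      | cons p ps =>
        have : pvDsplit (c :: rest) = (c :: p) :: ps := by simp [pvDsplit, hcne, hd]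
        rw [hd] at ih
        simp [this, List.takeWhile, hcne, ← ih]

lemma dsplit_tail_join (cs : List Char) :
    PySem.Chars.join ['.'] (pvDsplit cs).tail
      = (cs.dropWhile (fun c => !(c == '.'))).drop 1 := by
  induction cs with
  | nil => simp [pvDsplit, PySem.Chars.join_nil]
  | cons c rest ih =>
    by_cases hc : c = '.'
    · subst hc
      have : pvDsplit ('.' :: rest) = [] :: pvDsplit rest := by simp [pvDsplit]
      simp [this, List.dropWhile, join_dsplit]
    · have hcne : (c == '.') = false := by simp [hc]
      cases hd : pvDsplit rest with
      | nil => exact absurd hd (pvDsplit_ne_nil rest)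
      | cons p ps =>
        have : pvDsplit (c :: rest) = (c :: p) :: ps := by simp [pvDsplit, hcne, hd]
        rw [hd] at ih
        simp [this, List.dropWhile, hcne, ← ih]

def pvStep (d : PySem.Dict String (PySem.Dict String Int)) (p : (String × String) × Int) :
    PySem.Dict String (PySem.Dict String Int) :=
  d.modify p.1.1 PySem.Dict.empty (fun inner => inner.insert p.1.2 p.2)

lemma pvGetD_fold (L : List ((String × String) × Int)) (h : String)
    (d : PySem.Dict String (PySem.Dict String Int)) :
    (L.foldl pvStep d).getD h PySem.Dict.empty
      = (L.filter (fun p => p.1.1 == h)).foldl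
          (fun inner p => inner.insert p.1.2 p.2) (d.getD h PySem.Dict.empty) := by
  induction L generalizing d with
  | nil => simp
  | cons p rest ih =>
    simp only [List.foldl_cons, ih, List.filter_cons]
    by_cases hph : p.1.1 = h
    · subst hph
      simp [pvStep]
    · have : (p.1.1 == h) = false := by simp [hph]
      simp only [this, Bool.false_eq_true, if_false]
      congr 1
      simp [pvStep, PySem.Dict.getD_modify, Ne.symm hph]

lemma pvHead_eq (k : String) :
    String.ofList ((PySem.List.slice (PySem.Chars.splitOn k.toList ['.']) none (some 1)).headD [])
      = (pvPartitionHT k).1 := by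
  rw [splitOn_eq_dsplit, PySem.List.slice_to _ (by norm_num : (0:Int) ≤ 1)]
  have htake : (((pvDsplit k.toList).take (1:Int).toNat)).headD [] = (pvDsplit k.toList).headD [] := by
    cases pvDsplit k.toList <;> simp
  rw [htake, dsplit_head]
  rfl

lemma pvTail_eq (k : String) :
    String.ofList (PySem.Chars.join ['.'] (PySem.List.slice (PySem.Chars.splitOn k.toList ['.']) (some 1) none))
      = (pvPartitionHT k).2 := by
  rw [splitOn_eq_dsplit, PySem.List.slice_from _ (by norm_num : (0:Int) ≤ 1)]
  rw [show ((1:Int).toNat) = 1 by rfl, List.drop_one, dsplit_tail_join]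
  rfl

lemma pvPorts_eq (sd : List (String × Int)) :
    expand_once sd = expand_once_alt sd := by
  unfold expand_once expand_once_alt
  simp only
  have hstep : (fun (d : PySem.Dict String (PySem.Dict String Int)) (kv : String × Int) =>
      let parts := PySem.Chars.splitOn kv.1.toList ['.']
      let head := String.ofList ((PySem.List.slice parts none (some 1)).headD [])
      let tail := String.ofList (PySem.Chars.join ['.'] (PySem.List.slice parts (some 1) none))
      d.modify head PySem.Dict.empty (fun inner => inner.insert tail kv.2))
      = (fun d kv => pvStep d ((pvPartitionHT kv.1), kv.2)) := by
    funext d kv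
    simp only [pvStep, pvHead_eq, pvTail_eq]
  rw [hstep]
  rw [show (List.foldl (fun d kv => pvStep d ((pvPartitionHT kv.1), kv.2)) PySem.Dict.empty sd)
      = List.foldl pvStep PySem.Dict.empty (sd.map (fun kv => ((pvPartitionHT kv.1), kv.2)))
    from (List.foldl_map).symm]
  set L := sd.map (fun kv => ((pvPartitionHT kv.1), kv.2)) with hL
  have hrepr : L.foldl pvStep PySem.Dict.empty
      = L.foldl (fun d x => d.modify (x.1.1) PySem.Dict.empty
          ((fun (_ : PySem.Dict String (PySem.Dict String Int)) (x : (String × String) × Int) =>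
             fun inner => inner.insert x.1.2 x.2) d x)) PySem.Dict.empty := rfl
  have hkeys : (L.foldl pvStep PySem.Dict.empty).keys
      = PySem.List.dedup (L.map (fun p => p.1.1)) := by
    rw [hrepr, PySem.Dict.keys_foldl_modify_key, PySem.Dict.keys_empty,
        PySem.List.dedup_eq_ofList]
    rfl
  have hnodup : (L.foldl pvStep PySem.Dict.empty).keys.Nodup := by
    rw [hrepr]
    exact PySem.Dict.nodup_keys_foldl_modify_key _ _ _ _ _ (by simp [PySem.Dict.keys_empty])
  rw [PySem.Dict.items_eq_map_keys _ hnodup PySem.Dict.empty]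
  rw [hkeys, List.map_map]
  refine List.map_congr_left ?_
  intro h hh
  simp only [Function.comp]
  rw [pvGetD_fold, PySem.Dict.getD_empty]

-- ===== VERDICT (by name: the statement is the Claim_ definition above) =====
theorem expand_once_spec : Claim_equal_expand_once := by
  intro sd _
  unfold Spec_expand_once
  exact pvPorts_eq sd
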